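-- pv_equiv track=rewrite | github.com/chrislucas/googlecodejam-training-python | TrainingGCJ2018/kspracticeround2018/GoogolString.py | naive_test
-- ===== SOURCE A (Python) =====
-- def naive_test(n):
--     i = 1
--     _str_i, _str_j = "", ""
--     while i <= n:
--         # tornar a string si+1 em si para realizar a concatenacao mais tarde
--         _str_j = _str_i
--         # reverse
--         _str_i = _str_i[::-1]
--         # switch
--         si = "".join(["0" if _str_i[j] == "1" else "1" for j in range(0, len(_str_i))])
--         # si+1 = si + 0 + swich(reverse(si))
--         _str_j += "0" + si
--         _str_i = _str_j
--         i += 1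
--     return _str_i
-- ===== SOURCE B (Python) =====
-- def naive_test(n):
--     # Maintain the pair (s, t) with the invariant t == switch(reverse(s));
--     # then the next pair is (s + "0" + t, s + "1" + t): no reversing or
--     # per-character flipping pass is ever needed.
--     i = 1
--     s, t = "", ""
--     while i <= n:
--         s, t = s + "0" + t, s + "1" + t
--         i += 1
--     return s
-- ===== Notes on version B (the rewrite author's own statement) =====
-- stated objective: alternative
-- what changed: B replaces A's per-step reverse + per-character flip comprehension + join with a pair recurrence (s,t) -> (s+"0"+t, s+"1"+t) whose invariant t = switch(reverse(s)) makes each step a pure concatenation.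
import Mathlib
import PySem

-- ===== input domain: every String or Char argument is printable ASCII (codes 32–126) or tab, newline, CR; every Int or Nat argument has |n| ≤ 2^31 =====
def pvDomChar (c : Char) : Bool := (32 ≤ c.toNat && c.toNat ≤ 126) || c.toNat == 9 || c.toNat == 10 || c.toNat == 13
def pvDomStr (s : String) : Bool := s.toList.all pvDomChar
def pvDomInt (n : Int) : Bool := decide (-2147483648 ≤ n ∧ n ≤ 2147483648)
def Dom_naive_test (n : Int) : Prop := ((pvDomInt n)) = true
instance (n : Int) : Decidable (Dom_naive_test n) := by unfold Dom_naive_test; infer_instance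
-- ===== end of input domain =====

-- B replaces A's per-step reverse + flip comprehension + join with the pair recurrence
-- (s,t) -> (s+"0"+t, s+"1"+t), invariant t = switch(reverse(s)): each step is a pure concatenation.
-- Both ports carry Python strings as List Char (String.ofList at the boundary); string concat is ++ on the lists, exact.

-- ===== PORT A =====
-- si = "".join(["0" if _str_i[j] == "1" else "1" for j in range(0, len(_str_i))]) applied to _str_i = s[::-1];
-- the join of one-character strings is the list of the characters themselves.
def switchRevA (s : List Char) : List Char :=
  let rev := s.reverse  -- s[::-1], PySem.List.slice?_none_none_neg_one
  (PySem.List.pyRange 0 (PySem.List.len rev) 1).map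
    (fun j => if PySem.List.pyGetD rev j ' ' = '1' then '0' else '1')

-- while i <= n: runs max(n,0) = n.toNat times; state is _str_i (s)
def naive_testLoop : Nat → List Char → List Char
  | 0, s => s
  | fuel + 1, s =>
      -- _str_j = _str_i; _str_j += "0" + si; _str_i = _str_j
      naive_testLoop fuel (s ++ ['0'] ++ switchRevA s)

def naive_test (n : Int) : String := String.ofList (naive_testLoop n.toNat [])

-- ===== PORT B =====
-- while i <= n: s, t = s + "0" + t, s + "1" + t
def naive_test_altLoop : Nat → List Char → List Char → List Char
  | 0, s, _ => s
  | fuel + 1, s, t => naive_test_altLoop fuel (s ++ ['0'] ++ t) (s ++ ['1'] ++ t)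

def naive_test_alt (n : Int) : String := String.ofList (naive_test_altLoop n.toNat [] [])

-- ===== PRECONDITION & SPEC =====
def Spec_naive_test (n : Int) (out : String) : Prop := out = naive_test_alt n
instance (n : Int) (out : String) : Decidable (Spec_naive_test n out) := by unfold Spec_naive_test; infer_instance

-- ===== CLAIM (what is proved, stated in full; the proofs are below) =====
def Claim_equal_naive_test : Prop := ∀ (n : Int), Dom_naive_test n → Spec_naive_test n (naive_test n)

-- ===== LEMMAS AND PROOFS =====

def flipc (c : Char) : Char := if c = '1' then '0' else '1'

lemma switchRevA_eq_map (s : List Char) : switchRevA s = s.reverse.map flipc := by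
  unfold switchRevA
  have h := PySem.List.map_pyGetD_pyRange_zero (xs := s.reverse) (d := ' ')
  calc (PySem.List.pyRange 0 (PySem.List.len s.reverse) 1).map
          (fun j => if PySem.List.pyGetD s.reverse j ' ' = '1' then '0' else '1')
      = ((PySem.List.pyRange 0 (PySem.List.len s.reverse) 1).map
          (fun j => PySem.List.pyGetD s.reverse j ' ')).map flipc := by
        simp [List.map_map, flipc]
    _ = s.reverse.map flipc := by rw [h]

def BinStr (s : List Char) : Prop := ∀ c ∈ s, c = '0' ∨ c = '1'

lemma flipc_flipc {c : Char} (h : c = '0' ∨ c = '1') : flipc (flipc c) = c := by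
  rcases h with h | h <;> subst h <;> decide

lemma loop_eq (k : Nat) : ∀ (s t : List Char), BinStr s → t = s.reverse.map flipc →
    naive_testLoop k s = naive_test_altLoop k s t := by
  induction k with
  | zero => intro s t _ _; rfl
  | succ k ih =>
      intro s t hb ht
      show naive_testLoop k (s ++ ['0'] ++ switchRevA s)
          = naive_test_altLoop k (s ++ ['0'] ++ t) (s ++ ['1'] ++ t)
      rw [switchRevA_eq_map, ← ht]
      apply ih
      · intro c hc
        simp only [List.append_assoc, List.mem_append, List.mem_cons] at hc
        rcases hc with hc | hc | hc
        · exact hb c hc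
        · simp_all
        · subst ht
          rcases List.mem_map.mp (by simpa using hc) with ⟨d, _, rfl⟩
          unfold flipc; split <;> simp
      · subst ht
        have h1 : s.map (fun c => flipc (flipc c)) = s := by
          calc s.map (fun c => flipc (flipc c)) = s.map id := by
                apply List.map_congr_left
                intro c hc; exact flipc_flipc (hb c hc)
            _ = s := List.map_id s
        have h2 : flipc '0' = '1' := by decide
        simp only [List.reverse_append, List.reverse_cons, List.nil_append, List.map_append, List.map_reverse, List.reverse_reverse,
          List.map_map, List.map_cons, List.append_assoc, Function.comp_def, h1, h2, List.cons_append]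

-- ===== VERDICT (by name: the statement is the Claim_ definition above) =====
theorem naive_test_spec : Claim_equal_naive_test := by
  intro n _
  show naive_test n = naive_test_alt n
  unfold naive_test naive_test_alt
  exact congrArg String.ofList (loop_eq n.toNat [] [] (by intro c hc; cases hc) (by simp))
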